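-- pv_equiv track=rewrite | github.com/onerbs/treux | core/util/__init__.py | peek
-- ===== SOURCE A (Python) =====
-- def peek(text: str, length: int) -> str:
-- 	if len(text) < length:
-- 		return text
-- 	words = text.split(' ')
-- 	result = words.pop(0)
-- 	if len(result) > length:
-- 		result = result[:length]
-- 	while len(result) < length:
-- 		result += f' {words.pop(0)}'
-- 	return result + '...'
-- ===== SOURCE B (Python) =====
-- def peek(text: str, length: int) -> str:
--     if len(text) < length:
--         return text
--     first_space = text.find(' ')
--     word0 = text if first_space == -1 else text[:first_space]
--     if len(word0) > length:
--         return word0[:length] + '...'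
--     p = text.find(' ', length)
--     if p == -1:
--         p = len(text)
--     return text[:p] + '...'
-- ===== Notes on version B (the rewrite author's own statement) =====
-- stated objective: simpler
-- what changed: B replaces A's split(' ')/pop(0)/while-accumulation with two str.find calls and a single slice of the original text (the first word-boundary position >= length), plus a direct slice of the first word when that word alone exceeds length.
import Mathlib
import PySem

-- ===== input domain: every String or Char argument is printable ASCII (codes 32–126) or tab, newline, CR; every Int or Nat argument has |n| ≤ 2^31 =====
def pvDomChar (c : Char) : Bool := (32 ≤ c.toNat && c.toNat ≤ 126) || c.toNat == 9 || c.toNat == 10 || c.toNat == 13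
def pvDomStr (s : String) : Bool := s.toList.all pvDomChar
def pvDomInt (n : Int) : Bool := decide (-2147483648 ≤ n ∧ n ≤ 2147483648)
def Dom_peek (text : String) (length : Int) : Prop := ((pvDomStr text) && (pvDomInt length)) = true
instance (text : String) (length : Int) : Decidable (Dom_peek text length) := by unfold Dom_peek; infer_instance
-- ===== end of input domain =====

-- B computes the cut point with two str.find calls and one slice instead of A's
-- split(' ')/pop(0)/while accumulation loop (objective: simpler; same O(n) cost).

-- ===== PORT A =====
-- the `while len(result) < length: result += f' {words.pop(0)}'` loop of A;
-- the `[]` branch is where Python's pop(0) would raise IndexError — unreachable, because the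
-- pieces of text.split(' ') always rebuild text, whose length is ≥ length on entry.
def peekLoop (result : List Char) (words : List (List Char)) (length : Int) : List Char :=
  if (result.length : Int) < length then
    match words with
    | [] => result
    | w :: ws => peekLoop (result ++ ' ' :: w) ws length
  else result

def peek (text : String) (length : Int) : String :=
  if PySem.Str.len text < length then text
  else
    match PySem.Chars.splitOn text.toList [' '] with   -- words = text.split(' '); result = words.pop(0)
    | [] => text                                       -- unreachable: split(' ') always yields ≥ 1 piece
    | w0 :: rest =>
      let result := if (w0.length : Int) > length then PySem.List.slice w0 none (some length) else w0
      String.ofList (peekLoop result rest length ++ ['.', '.', '.'])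

-- ===== PORT B =====
def peek_alt (text : String) (length : Int) : String :=
  if PySem.Str.len text < length then text
  else
    let l := text.toList
    let fs := PySem.Chars.find l [' ']
    let word0 := if fs = -1 then l else PySem.List.slice l none (some fs)
    if (word0.length : Int) > length then
      String.ofList (PySem.List.slice word0 none (some length) ++ ['.', '.', '.'])
    else
      let p := PySem.Chars.findFrom l [' '] length none
      let p' := if p = -1 then (l.length : Int) else p
      String.ofList (PySem.List.slice l none (some p') ++ ['.', '.', '.'])

-- ===== PRECONDITION & SPEC =====
def Spec_peek (text : String) (length : Int) (out : String) : Prop := out = peek_alt text length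
instance (text : String) (length : Int) (out : String) : Decidable (Spec_peek text length out) := by unfold Spec_peek; infer_instance

-- ===== CLAIM (what is proved, stated in full; the proofs are below) =====
def Claim_equal_peek : Prop := ∀ (text : String) (length : Int), Dom_peek text length → Spec_peek text length (peek text length)

-- ===== LEMMAS AND PROOFS =====

-- structural model of text.split(' '): pvSplit, with pvConsHead gluing a prefix onto the first piece
def pvConsHead (p : List Char) : List (List Char) → List (List Char)
  | [] => [p]
  | q :: qs => (p ++ q) :: qs

def pvSplit : List Char → List (List Char)
  | [] => [[]]
  | d :: r => if d = ' ' then [] :: pvSplit r else pvConsHead [d] (pvSplit r)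

-- ' '.join of the later pieces, each preceded by one space
def pvJoin (ws : List (List Char)) : List Char := (ws.map (fun w => ' ' :: w)).flatten

theorem pvSplit_ne_nil (l : List Char) : pvSplit l ≠ [] := by
  cases l with
  | nil => simp [pvSplit]
  | cons d r =>
    simp only [pvSplit]
    split
    · simp
    · cases h : pvSplit r <;> simp [pvConsHead, h]

theorem pvConsHead_consHead (p q : List Char) (m : List (List Char)) :
    pvConsHead p (pvConsHead q m) = pvConsHead (p ++ q) m := by
  cases m <;> simp [pvConsHead]

theorem pvSplitOn_go_eq (fuel : Nat) : ∀ (l cur : List Char) (acc : List (List Char)),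
    l.length < fuel →
    PySem.Chars.splitOn.go [' '] fuel l cur acc = acc.reverse ++ pvConsHead cur.reverse (pvSplit l) := by
  induction fuel with
  | zero => intro l cur acc h; omega
  | succ fuel ih =>
    intro l cur acc h
    cases l with
    | nil =>
      rw [PySem.Chars.splitOn.go]
      · simp [pvSplit, pvConsHead]
      · omega
    | cons c rest =>
      rw [PySem.Chars.splitOn.go]
      by_cases hc : c = ' '
      · subst hc
        rw [if_pos (by simp)]
        rw [ih _ _ _ (by simpa using Nat.lt_of_succ_lt_succ h)]
        simp only [pvSplit, if_pos rfl]
        cases hs : pvSplit rest with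
        | nil => exact absurd hs (pvSplit_ne_nil rest)
        | cons q qs => simp [pvConsHead, hs]
      · rw [if_neg (by simp [Ne.symm hc])]
        rw [ih _ _ _ (by simpa using Nat.lt_of_succ_lt_succ h)]
        simp only [pvSplit, if_neg hc]
        rw [pvConsHead_consHead]
        simp

theorem pvSplitOn_eq (l : List Char) : PySem.Chars.splitOn l [' '] = pvSplit l := by
  show PySem.Chars.splitOn.go [' '] (l.length + 1) l [] [] = pvSplit l
  rw [pvSplitOn_go_eq (l.length + 1) l [] [] (by omega)]
  cases hs : pvSplit l with
  | nil => exact absurd hs (pvSplit_ne_nil l)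
  | cons q qs => simp [pvConsHead]

theorem pvSplit_recon : ∀ (l w0 : List Char) (ws : List (List Char)),
    pvSplit l = w0 :: ws → w0 ++ pvJoin ws = l := by
  intro l
  induction l with
  | nil =>
    intro w0 ws h
    simp only [pvSplit] at h
    obtain ⟨rfl, rfl⟩ := List.cons.inj h.symm
    simp [pvJoin]
  | cons d r ih =>
    intro w0 ws h
    by_cases hd : d = ' '
    · subst hd
      simp only [pvSplit, reduceIte] at h
      obtain ⟨rfl, rfl⟩ := List.cons.inj h.symm
      cases hs : pvSplit r with
      | nil => exact absurd hs (pvSplit_ne_nil r)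
      | cons q qs =>
        have := ih q _ hs
        simp only [hs, pvJoin, List.map_cons, List.flatten_cons, List.nil_append]
        simp only [pvJoin] at this
        simp [this]
    · cases hs : pvSplit r with
      | nil => exact absurd hs (pvSplit_ne_nil r)
      | cons q qs =>
        simp only [pvSplit, if_neg hd, hs, pvConsHead] at h
        obtain ⟨rfl, rfl⟩ := List.cons.inj h.symm
        have := ih q _ hs
        simpa using this

theorem pvSplit_no_space : ∀ (l : List Char), ∀ w ∈ pvSplit l, ' ' ∉ w := by
  intro l
  induction l with
  | nil => intro w hw; simp [pvSplit] at hw; simp [hw]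
  | cons d r ih =>
    intro w hw
    cases hs : pvSplit r with
    | nil => exact absurd hs (pvSplit_ne_nil r)
    | cons q qs =>
      by_cases hd : d = ' '
      · subst hd
        simp only [pvSplit, if_pos rfl, hs] at hw
        rcases List.mem_cons.1 hw with rfl | hw'
        · simp
        · exact ih w (hs ▸ hw')
      · simp only [pvSplit, if_neg hd, hs, pvConsHead] at hw
        rcases List.mem_cons.1 hw with rfl | hw'
        · intro hmem
          rcases List.mem_cons.1 hmem with h1 | h2
          · exact hd h1.symm
          · exact ih q (hs ▸ List.mem_cons_self ..) h2
        · exact ih w (hs ▸ List.mem_cons_of_mem _ hw')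

theorem pvSingleton_infix (c : Char) (m : List Char) : [c] <:+: m ↔ c ∈ m := by
  constructor
  · rintro ⟨s, t, rfl⟩; simp
  · intro h
    obtain ⟨s, t, rfl⟩ := List.append_of_mem h
    exact ⟨s, t, by simp⟩

theorem pvFind_space_of_not_mem (m : List Char) (h : ' ' ∉ m) : PySem.Chars.find m [' '] = -1 := by
  rw [PySem.Chars.find_eq_neg_one_iff]
  rw [pvSingleton_infix]
  exact h

theorem pvSingleton_prefix (c : Char) (m : List Char) : [c] <+: m ↔ ∃ t, m = c :: t := by
  rw [List.cons_prefix_iff]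
  simp

theorem pvFind_space_of_mem (m : List Char) (h : ' ' ∈ m) :
    PySem.Chars.find m [' '] = (m.findIdx (· == ' ') : Int) := by
  have hne : PySem.Chars.find m [' '] ≠ -1 := by
    intro hc
    rw [PySem.Chars.find_eq_neg_one_iff, pvSingleton_infix] at hc
    exact hc h
  have hge : 0 ≤ PySem.Chars.find m [' '] := by
    have := PySem.Chars.neg_one_le_find m [' ']
    omega
  obtain ⟨hpre, hmin⟩ := PySem.Chars.find_spec hge
  set k := (PySem.Chars.find m [' ']).toNat with hk
  have hkm : k < m.length := by
    by_contra hkm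
    push_neg at hkm
    rw [List.drop_eq_nil_of_le hkm] at hpre
    simp [pvSingleton_prefix] at hpre
  have hjlt : m.findIdx (· == ' ') < m.length := by
    rw [List.findIdx_lt_length]
    exact ⟨' ', h, by simp⟩
  set j := m.findIdx (· == ' ') with hj
  have hmk : m[k] = ' ' := by
    obtain ⟨t, ht⟩ := (pvSingleton_prefix ' ' _).1 hpre
    have h0 : (m.drop k)[0]? = some ' ' := by rw [ht]; rfl
    rw [List.getElem?_drop] at h0
    have := List.getElem?_eq_getElem (l := m) (i := k + 0) (by omega)
    simp only [Nat.add_zero] at h0 this ⊢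
    rw [this] at h0
    exact Option.some.inj h0
  have h1 : j ≤ k := by
    by_contra h1
    push_neg at h1
    have := List.not_of_lt_findIdx (h1 : k < j)
    simp at this
    exact this hmk
  have h2 : ¬ j < k := by
    intro h2
    have hpj : [' '] <+: m.drop j := by
      rw [pvSingleton_prefix]
      refine ⟨m.drop (j+1), ?_⟩
      rw [List.drop_eq_getElem_cons hjlt]
      congr 1
      have := @List.findIdx_getElem _ (· == ' ') m hjlt
      simpa using this
    exact hmin j h2 hpj
  have hjk : j = k := by omega
  show _ = ((j : Nat) : Int)
  rw [hjk]
  omega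

theorem pvFindIdx_space_append (a b : List Char) (ha : ' ' ∉ a) :
    (a ++ b).findIdx (· == ' ') = a.length + b.findIdx (· == ' ') := by
  rw [List.findIdx_append]
  have : a.findIdx (· == ' ') = a.length := by
    rw [List.findIdx_eq_length]
    intro x hx
    simp
    rintro rfl
    exact ha hx
  simp [this]
  omega


theorem peekLoop_eq (ws : List (List Char)) : ∀ (acc : List Char) (n : Nat),
    (∀ w ∈ ws, ' ' ∉ w) → ' ' ∉ acc.drop n →
    peekLoop acc ws (n : Int) =
      (acc ++ pvJoin ws).take (n + ((acc ++ pvJoin ws).drop n).findIdx (· == ' ')) := by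
  induction ws with
  | nil =>
    intro acc n _ hacc
    have hfi : (acc.drop n).findIdx (· == ' ') = (acc.drop n).length := by
      rw [List.findIdx_eq_length]
      intro x hx
      simp
      rintro rfl
      exact hacc hx
    simp only [pvJoin, List.map_nil, List.flatten_nil, List.append_nil]
    have hL : peekLoop acc [] (n : Int) = acc := by
      rw [peekLoop]
      split <;> rfl
    rw [hL, hfi, List.length_drop]
    rw [List.take_of_length_le (by omega)]
  | cons w ws' ih =>
    intro acc n hws hacc
    have hw : ' ' ∉ w := hws w (List.mem_cons_self ..)
    have hT : acc ++ pvJoin (w :: ws') = (acc ++ ' ' :: w) ++ pvJoin ws' := by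
      simp [pvJoin]
    by_cases hlt : acc.length < n
    · have hL : peekLoop acc (w :: ws') (n : Int) = peekLoop (acc ++ ' ' :: w) ws' (n : Int) := by
        rw [peekLoop]
        rw [if_pos (by exact_mod_cast hlt)]
      rw [hL, hT]
      apply ih
      · intro v hv; exact hws v (List.mem_cons_of_mem _ hv)
      · intro hmem
        rw [List.drop_append] at hmem
        rcases List.mem_append.1 hmem with h1 | h1
        · exact hacc h1
        · have hd : n - acc.length = (n - acc.length - 1) + 1 := by omega
          rw [hd, List.drop_succ_cons] at h1
          exact hw (List.mem_of_mem_drop h1)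
    · push_neg at hlt
      have hL : peekLoop acc (w :: ws') (n : Int) = acc := by
        rw [peekLoop]
        rw [if_neg (by push_neg; exact_mod_cast hlt)]
      have hdrop : (acc ++ pvJoin (w :: ws')).drop n = acc.drop n ++ pvJoin (w :: ws') := by
        rw [List.drop_append, Nat.sub_eq_zero_of_le hlt, List.drop_zero]
      have hfi : (acc.drop n ++ pvJoin (w :: ws')).findIdx (· == ' ') = (acc.drop n).length := by
        have h0 : (pvJoin (w :: ws')).findIdx (· == ' ') = 0 := by
          simp [pvJoin, List.findIdx_cons]
        have := pvFindIdx_space_append (acc.drop n) (pvJoin (w :: ws')) hacc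
        rw [this, h0]
        omega
      rw [hL, hdrop, hfi, List.length_drop]
      have hlen : n + (acc.length - n) = acc.length := by omega
      rw [hlen]
      exact List.take_left.symm

theorem pvNot_mem_of_find_eq_neg_one (m : List Char) (h : PySem.Chars.find m [' '] = -1) :
    ' ' ∉ m := by
  intro hmem
  rw [pvFind_space_of_mem m hmem] at h
  omega

theorem peek_eq_alt (text : String) (length : Int) : peek text length = peek_alt text length := by
  rw [peek, peek_alt]
  by_cases hlt : PySem.Str.len text < length
  · rw [if_pos hlt, if_pos hlt]
  · rw [if_neg hlt, if_neg hlt]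
    rw [PySem.Str.len_eq] at hlt
    push_neg at hlt
    simp only [pvSplitOn_eq]
    cases hs : pvSplit text.toList with
    | nil => exact absurd hs (pvSplit_ne_nil _)
    | cons w0 ws =>
      have hrec : w0 ++ pvJoin ws = text.toList := pvSplit_recon _ w0 ws hs
      have hw0 : ' ' ∉ w0 := pvSplit_no_space _ w0 (hs ▸ List.mem_cons_self ..)
      have hword0 : (if PySem.Chars.find text.toList [' '] = -1 then text.toList
            else PySem.List.slice text.toList none (some (PySem.Chars.find text.toList [' ']))) = w0 := by
        cases ws with
        | nil =>
          have hlw : text.toList = w0 := by simpa [pvJoin] using hrec.symm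
          rw [if_pos (pvFind_space_of_not_mem _ (hlw ▸ hw0))]
          exact hlw
        | cons w ws' =>
          have hmem : ' ' ∈ text.toList := by rw [← hrec]; simp [pvJoin]
          have hfi : text.toList.findIdx (· == ' ') = w0.length := by
            conv_lhs => rw [← hrec]
            have hj : pvJoin (w :: ws') = ' ' :: (w ++ pvJoin ws') := by simp [pvJoin]
            rw [hj, pvFindIdx_space_append w0 _ hw0]
            simp [List.findIdx_cons]
          rw [pvFind_space_of_mem _ hmem, hfi]
          rw [if_neg (by omega)]
          rw [PySem.List.slice_to_natCast]
          conv_lhs => rw [← hrec]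
          exact List.take_left
      simp only [hword0]
      by_cases hgt : (w0.length : Int) > length
      · rw [if_pos hgt, if_pos hgt]
        have hres : ¬ (((PySem.List.slice w0 none (some length)).length : Int) < length) := by
          by_cases h0 : 0 ≤ length
          · rw [PySem.List.slice_to w0 h0, List.length_take]
            have h1 : (length.toNat : Int) = length := Int.toNat_of_nonneg h0
            have h2 : length.toNat ≤ w0.length := by omega
            rw [Nat.min_eq_left h2]
            omega
          · have := Int.natCast_nonneg (PySem.List.slice w0 none (some length)).length
            omega
        rw [peekLoop.eq_def, if_neg hres]
      · rw [if_neg hgt, if_neg hgt]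
        push_neg at hgt
        have h0 : 0 ≤ length := le_trans (Int.natCast_nonneg _) hgt
        obtain ⟨n, rfl⟩ : ∃ n : Nat, (n : Int) = length := ⟨length.toNat, Int.toNat_of_nonneg h0⟩
        have hnl : n ≤ text.toList.length := by exact_mod_cast hlt
        have hloop : peekLoop w0 ws (n : Int) =
            text.toList.take (n + (text.toList.drop n).findIdx (· == ' ')) := by
          rw [peekLoop_eq ws w0 n (fun w hw => pvSplit_no_space _ w (hs ▸ List.mem_cons_of_mem _ hw))
            (fun hmem => hw0 (List.mem_of_mem_drop hmem)), hrec]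
        rw [hloop]
        rw [PySem.Chars.findFrom_natCast _ [' '] n hnl]
        by_cases hfd : PySem.Chars.find (text.toList.drop n) [' '] = -1
        · rw [if_pos hfd]
          have hnm : ' ' ∉ text.toList.drop n := pvNot_mem_of_find_eq_neg_one _ hfd
          have hfi : (text.toList.drop n).findIdx (· == ' ') = (text.toList.drop n).length := by
            rw [List.findIdx_eq_length]
            intro x hx
            simp
            rintro rfl
            exact hnm hx
          rw [hfi, List.length_drop]
          rw [if_pos rfl, PySem.List.slice_to_natCast, List.take_length]
          rw [List.take_of_length_le (by omega)]
        · rw [if_neg hfd]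
          have hmem : ' ' ∈ text.toList.drop n := by
            by_contra hnm
            exact hfd (pvFind_space_of_not_mem _ hnm)
          rw [pvFind_space_of_mem _ hmem]
          rw [if_neg (by omega)]
          have hcast : (n : Int) + ((text.toList.drop n).findIdx (· == ' ') : Int) =
              ((n + (text.toList.drop n).findIdx (· == ' ') : Nat) : Int) := by push_cast; ring
          rw [hcast, PySem.List.slice_to_natCast]

-- ===== VERDICT (by name: the statement is the Claim_ definition above) =====
theorem peek_spec : Claim_equal_peek := by
  intro text length _
  exact peek_eq_alt text length
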